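-- pv_equiv track=rewrite | github.com/twmeric/squirrel-reminder | squirrel-services/m04-insight-engine/src/event_detector.py | _count_no_commute_days
-- ===== SOURCE A (Python) =====
-- from typing import Dict, List, Optional, Tuple
--
-- def _count_no_commute_days(daily_stats: List[Dict]) -> int:
--     """统计连续无通勤天数"""
--     count = 0
--     for stat in reversed(daily_stats):
--         if stat.get("is_weekday", False) and stat.get("commute_count", 0) == 0:
--             count += 1
--         elif stat.get("is_weekday", False):
--             break
--     return count
-- ===== SOURCE B (Python) =====
-- from itertools import takewhile
--
-- def _count_no_commute_days(daily_stats):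
--     weekdays = [s for s in daily_stats if s.get("is_weekday", False)]
--     return sum(1 for _ in takewhile(lambda s: s.get("commute_count", 0) == 0,
--                                     reversed(weekdays)))
-- ===== Notes on version B (the rewrite author's own statement) =====
-- stated objective: simpler
-- what changed: Replaces the single reverse loop with break by a filter of the weekday entries followed by counting the trailing zero-commute run with itertools.takewhile.
import Mathlib
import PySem

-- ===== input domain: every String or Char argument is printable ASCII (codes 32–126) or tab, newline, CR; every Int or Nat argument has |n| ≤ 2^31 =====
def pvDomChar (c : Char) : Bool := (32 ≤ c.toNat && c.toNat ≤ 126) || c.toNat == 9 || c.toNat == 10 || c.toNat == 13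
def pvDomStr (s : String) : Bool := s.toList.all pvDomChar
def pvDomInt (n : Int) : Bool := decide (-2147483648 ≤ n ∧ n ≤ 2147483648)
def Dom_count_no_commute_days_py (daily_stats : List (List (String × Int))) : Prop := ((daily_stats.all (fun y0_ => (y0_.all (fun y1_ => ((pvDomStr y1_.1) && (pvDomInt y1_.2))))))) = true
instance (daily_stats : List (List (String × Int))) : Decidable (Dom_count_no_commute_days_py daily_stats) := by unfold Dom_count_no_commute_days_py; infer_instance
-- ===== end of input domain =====

-- B separates the weekend-skipping filter from the trailing-run takeWhile count (objective: simpler decomposition).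


-- ===== PORT A =====
-- stat.get("is_weekday", False) on an Int-valued dict: missing → falsy, present → truthy iff ≠ 0.
def pvIsWeekday (stat : List (String × Int)) : Bool :=
  PySem.Dict.getD (PySem.Dict.mk stat) "is_weekday" (0 : Int) != 0

def pvNoCommute (stat : List (String × Int)) : Bool :=
  PySem.Dict.getD (PySem.Dict.mk stat) "commute_count" (0 : Int) == 0

-- A: walk reversed(daily_stats); count a weekday with no commutes, break on a weekday with commutes,
-- skip (weekend) otherwise.  The break is the `else if … then 0` arm of this recursion.
def pvALoop : List (List (String × Int)) → Int
  | [] => 0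
  | stat :: rest =>
    if pvIsWeekday stat && pvNoCommute stat then 1 + pvALoop rest
    else if pvIsWeekday stat then 0
    else pvALoop rest

def count_no_commute_days_py (daily_stats : List (List (String × Int))) : Int :=
  pvALoop daily_stats.reverse

-- ===== PORT B =====
-- B: filter the weekday entries, then count the trailing zero-commute run (takewhile over reversed).
def count_no_commute_days_py_alt (daily_stats : List (List (String × Int))) : Int :=
  let weekdays := daily_stats.filter pvIsWeekday
  ((weekdays.reverse.takeWhile pvNoCommute).length : Int)

-- ===== PRECONDITION & SPEC =====
def Spec_count_no_commute_days_py (daily_stats : List (List (String × Int))) (out : Int) : Prop := out = count_no_commute_days_py_alt daily_stats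
instance (daily_stats : List (List (String × Int))) (out : Int) : Decidable (Spec_count_no_commute_days_py daily_stats out) := by unfold Spec_count_no_commute_days_py; infer_instance

-- ===== CLAIM (what is proved, stated in full; the proofs are below) =====
def Claim_equal_count_no_commute_days_py : Prop := ∀ (daily_stats : List (List (String × Int))), Dom_count_no_commute_days_py daily_stats → Spec_count_no_commute_days_py daily_stats (count_no_commute_days_py daily_stats)

-- ===== LEMMAS AND PROOFS =====

-- A's loop on a list = length of the zero-commute prefix of its weekday entries.
theorem pvALoop_eq (l : List (List (String × Int))) :
    pvALoop l = (((l.filter pvIsWeekday).takeWhile pvNoCommute).length : Int) := by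
  induction l with
  | nil => simp [pvALoop]
  | cons stat rest ih =>
    cases hw : pvIsWeekday stat with
    | false => simp [pvALoop, hw, List.filter_cons, ih]
    | true =>
      cases hc : pvNoCommute stat with
      | false => simp [pvALoop, hw, hc, List.filter_cons, List.takeWhile_cons]
      | true =>
        simp [pvALoop, hw, hc, List.filter_cons, List.takeWhile_cons, ih]
        omega

-- ===== VERDICT (by name: the statement is the Claim_ definition above) =====
theorem count_no_commute_days_py_spec : Claim_equal_count_no_commute_days_py := by
  intro ds _
  unfold Spec_count_no_commute_days_py count_no_commute_days_py count_no_commute_days_py_alt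
  rw [pvALoop_eq, List.filter_reverse]
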